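-- pv_equiv track=rewrite | github.com/abi26anamo/A2Sv | count_number_of_distinct_interget_after_reversing_it.py | countDistinctIntegers
-- ===== SOURCE A (Python) =====
-- from typing import List
--
-- def countDistinctIntegers(nums: List[int]) -> int:
--
--     def reversenum(num):
--         reversed_int = 0
--         while num>0:
--             last_digit = num%10
--             reversed_int = reversed_int*10+last_digit
--             num = num//10
--         return reversed_int
--
--     new_arr =[]
--     for num in nums:
--         new_arr.append(num)
--         new_arr.append(reversenum(num))
--
--     return len(set(new_arr))
-- ===== SOURCE B (Python) =====
-- from typing import List
--
--
-- def countDistinctIntegers(nums: List[int]) -> int: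
--
--     def rev(n, acc=0):
--         return acc if n <= 0 else rev(n // 10, acc * 10 + n % 10)
--
--     vals = sorted(v for num in nums for v in (num, rev(num)))
--     count = 0
--     prev = 0
--     for v in vals:
--         if count == 0 or v != prev:
--             count += 1
--         prev = v
--     return count
-- ===== Notes on version B (the rewrite author's own statement) =====
-- stated objective: alternative
-- what changed: Replaces the list-then-set hashing count with a sort-then-scan distinct count (sort all values and reversals, count positions where the value changes) and computes the digit reversal by tail recursion with an accumulator instead of a while loop.
import Mathlib
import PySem

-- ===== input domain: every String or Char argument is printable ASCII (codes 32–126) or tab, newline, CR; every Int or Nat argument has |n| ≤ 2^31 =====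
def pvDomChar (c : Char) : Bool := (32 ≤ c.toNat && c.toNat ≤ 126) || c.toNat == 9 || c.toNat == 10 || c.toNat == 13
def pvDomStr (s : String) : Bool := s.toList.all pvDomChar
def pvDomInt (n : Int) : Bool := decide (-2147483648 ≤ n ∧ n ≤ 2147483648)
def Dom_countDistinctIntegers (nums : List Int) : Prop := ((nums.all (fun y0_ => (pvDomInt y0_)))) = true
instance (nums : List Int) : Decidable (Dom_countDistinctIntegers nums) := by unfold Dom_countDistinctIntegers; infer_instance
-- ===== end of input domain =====

-- ===== PORT A =====
-- B replaces the list-then-set hashing count by a sort-then-scan distinct count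
-- and a tail-recursive digit reversal (objective: alternative; same return value).

-- A's helper `reversenum`: the while loop `while num > 0: ...` as recursion on num.toNat
def pvRevLoopA (num reversed_int : Int) : Int :=
  if h : 0 < num then
    pvRevLoopA (PySem.Int.floordiv num 10) (reversed_int * 10 + PySem.Int.mod num 10)
  else reversed_int
termination_by num.toNat
decreasing_by
  rw [PySem.Int.floordiv_eq_ediv_of_pos (by omega : (0:Int) < 10)]
  omega

def countDistinctIntegers (nums : List Int) : Int :=
  let new_arr := nums.foldl (fun arr num => arr ++ [num, pvRevLoopA num 0]) []
  PySem.Set.len (PySem.Set.ofList new_arr)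

-- ===== PORT B =====
-- B's helper `rev`: tail recursion `acc if n <= 0 else rev(n // 10, acc*10 + n%10)`
def pvRevB (n acc : Int) : Int :=
  if h : n ≤ 0 then acc
  else pvRevB (PySem.Int.floordiv n 10) (acc * 10 + PySem.Int.mod n 10)
termination_by n.toNat
decreasing_by
  rw [PySem.Int.floordiv_eq_ediv_of_pos (by omega : (0:Int) < 10)]
  omega

def countDistinctIntegers_alt (nums : List Int) : Int :=
  let vals := PySem.List.sorted (nums.flatMap (fun num => [num, pvRevB num 0])) (fun v => v) false
  (vals.foldl (fun (cp : Int × Int) v => ((if cp.1 == 0 || v != cp.2 then cp.1 + 1 else cp.1), v)) (0, 0)).1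

-- ===== PRECONDITION & SPEC =====
def Spec_countDistinctIntegers (nums : List Int) (out : Int) : Prop := out = countDistinctIntegers_alt nums
instance (nums : List Int) (out : Int) : Decidable (Spec_countDistinctIntegers nums out) := by unfold Spec_countDistinctIntegers; infer_instance

-- ===== CLAIM (what is proved, stated in full; the proofs are below) =====
def Claim_equal_countDistinctIntegers : Prop := ∀ (nums : List Int), Dom_countDistinctIntegers nums → Spec_countDistinctIntegers nums (countDistinctIntegers nums)

-- ===== LEMMAS AND PROOFS =====

theorem pvRev_eq (n acc : Int) : pvRevLoopA n acc = pvRevB n acc := by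
  induction n, acc using pvRevB.induct with
  | case1 n acc h =>
    rw [pvRevLoopA, pvRevB]
    rw [dif_neg (show ¬ 0 < n by omega), dif_pos h]
  | case2 n acc h ih =>
    rw [pvRevLoopA, pvRevB]
    rw [dif_pos (show 0 < n by omega), dif_neg h]
    exact ih

-- scan step of B's counting loop
theorem scan_aux (ys : List Int) (v c : Int) (hc : 0 < c)
    (hs : (v :: ys).Pairwise (· ≤ ·)) :
    (ys.foldl (fun (cp : Int × Int) w => ((if cp.1 == 0 || w != cp.2 then cp.1 + 1 else cp.1), w)) (c, v)).1
      = c + ((ys.toFinset.erase v).card : Int) := by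
  induction ys generalizing v c with
  | nil => simp
  | cons w t ih =>
    rw [List.pairwise_cons] at hs
    obtain ⟨hv, hs'⟩ := hs
    have hvw : v ≤ w := hv w (by simp)
    have hwt : ∀ y ∈ t, w ≤ y := (List.pairwise_cons.mp hs').1
    simp only [List.foldl_cons]
    have hc0 : (c == 0) = false := by simp; omega
    by_cases hwv : w = v
    · subst hwv
      simp only [hc0, bne_self_eq_false, Bool.or_self]
      rw [if_neg (by simp : ¬(false = true))]
      rw [ih w c hc hs']
      have : (w :: t).toFinset.erase w = t.toFinset.erase w := by
        ext x; simp
      rw [this]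
    · have hcond : (c == 0 || w != v) = true := by simp [hc0, hwv]
      simp only [hcond, if_true]
      rw [ih w (c + 1) (by omega) hs']
      have hvlt : v < w := lt_of_le_of_ne hvw (fun h => hwv h.symm)
      have hnm : v ∉ (w :: t).toFinset := by
        simp only [List.toFinset_cons, Finset.mem_insert, List.mem_toFinset]
        rintro (rfl | hx)
        · omega
        · exact absurd (hwt v hx) (by omega)
      rw [Finset.erase_eq_self.mpr hnm]
      simp only [List.toFinset_cons]
      by_cases hw : w ∈ t.toFinset
      · rw [Finset.insert_eq_self.mpr hw, Finset.card_erase_of_mem hw]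
        have hpos : 0 < t.toFinset.card := Finset.card_pos.mpr ⟨w, hw⟩
        omega
      · rw [Finset.card_insert_of_notMem hw, Finset.erase_eq_self.mpr hw]
        push_cast
        omega

theorem scan_main (ys : List Int) (p : Int) (hs : ys.Pairwise (· ≤ ·)) :
    (ys.foldl (fun (cp : Int × Int) w => ((if cp.1 == 0 || w != cp.2 then cp.1 + 1 else cp.1), w)) (0, p)).1
      = (ys.toFinset.card : Int) := by
  cases ys with
  | nil => simp
  | cons v t =>
    simp only [List.foldl_cons, beq_self_eq_true, Bool.true_or, if_true]
    rw [zero_add]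
    rw [scan_aux t v 1 (by omega) hs]
    simp only [List.toFinset_cons]
    by_cases hw : v ∈ t.toFinset
    · rw [Finset.insert_eq_self.mpr hw, Finset.card_erase_of_mem hw]
      have hpos : 0 < t.toFinset.card := Finset.card_pos.mpr ⟨v, hw⟩
      omega
    · rw [Finset.card_insert_of_notMem hw, Finset.erase_eq_self.mpr hw]
      omega

-- ===== VERDICT (by name: the statement is the Claim_ definition above) =====
theorem countDistinctIntegers_spec : Claim_equal_countDistinctIntegers := by
  intro nums _
  unfold Spec_countDistinctIntegers countDistinctIntegers countDistinctIntegers_alt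
  dsimp only
  rw [PySem.List.foldl_append_eq_flatMap (fun num => [num, pvRevLoopA num 0]) nums []]
  have hL : nums.flatMap (fun num => [num, pvRevLoopA num 0])
      = nums.flatMap (fun num => [num, pvRevB num 0]) := by
    simp [pvRev_eq]
  rw [List.nil_append, hL]
  rw [scan_main _ 0 (PySem.List.sorted_pairwise (nums.flatMap (fun num => [num, pvRevB num 0])) (fun v => v))]
  have hperm := PySem.List.sorted_perm (nums.flatMap (fun num => [num, pvRevB num 0])) (fun v => v) false
  have hts : (PySem.List.sorted (nums.flatMap (fun num => [num, pvRevB num 0])) (fun v => v) false).toFinset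
      = (nums.flatMap (fun num => [num, pvRevB num 0])).toFinset :=
    Finset.ext fun x => by simp [List.mem_toFinset, hperm.mem_iff]
  rw [hts]
  have hfin : (PySem.Set.ofList (nums.flatMap (fun num => [num, pvRevB num 0]))).toFinset
      = (nums.flatMap (fun num => [num, pvRevB num 0])).toFinset :=
    Finset.ext fun x => by simp [PySem.Set.mem_ofList]
  rw [PySem.Set.len, ← hfin,
    List.toFinset_card_of_nodup (PySem.Set.nodup_ofList (nums.flatMap (fun num => [num, pvRevB num 0])))]
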